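-- pv_equiv track=rewrite | github.com/VitoFe/Electric-Dark-Themes | export.py | convert_theme
-- ===== SOURCE A (Python) =====
-- def invert_hex(hex_color):
--   hex_color = hex_color.lstrip('#')
--   r, g, b = tuple(int(hex_color[i:i+2], 16) for i in (0, 2, 4))
--   r = 255 - r
--   g = 255 - g
--   b = 255 - b
--   inverted_hex = '#{:02x}{:02x}{:02x}'.format(r, g, b)
--   return inverted_hex
--
-- def convert_theme(theme):
--   new_theme = {}
--   for key, value in theme.items():
--     if value.startswith('#'):
--       new_value = invert_hex(value)
--     else:
--       new_value = value
--     new_theme[key] = new_value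
--   return new_theme
-- ===== SOURCE B (Python) =====
-- HEX = '0123456789abcdef'
--
-- def convert_theme(theme):
--   out = {}
--   for key, value in theme.items():
--     if value.startswith('#'):
--       s = value.lstrip('#')
--       value = '#' + ''.join(HEX[15 - int(c, 16)] for c in s[:6])
--     out[key] = value
--   return out
-- ===== Notes on version B (the rewrite author's own statement) =====
-- stated objective: simpler
-- what changed: B inverts a color nibble-wise (each of the first 6 hex digits d is replaced by HEX[15-d]) instead of A's three 2-char slice parses, three 255-x subtractions and a '{:02x}'-formatting of each channel; valid because 255-byte complements each nibble independently.
-- outside the precondition, e.g. on convert_theme({'k': '# 1 2 3'}): A returns {'k': '#fefdfc'}, B raises ValueError; on convert_theme({'k': '#abcde'}): A returns {'k': '#5432f1'}, B returns {'k': '#54321'}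
import Mathlib
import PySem

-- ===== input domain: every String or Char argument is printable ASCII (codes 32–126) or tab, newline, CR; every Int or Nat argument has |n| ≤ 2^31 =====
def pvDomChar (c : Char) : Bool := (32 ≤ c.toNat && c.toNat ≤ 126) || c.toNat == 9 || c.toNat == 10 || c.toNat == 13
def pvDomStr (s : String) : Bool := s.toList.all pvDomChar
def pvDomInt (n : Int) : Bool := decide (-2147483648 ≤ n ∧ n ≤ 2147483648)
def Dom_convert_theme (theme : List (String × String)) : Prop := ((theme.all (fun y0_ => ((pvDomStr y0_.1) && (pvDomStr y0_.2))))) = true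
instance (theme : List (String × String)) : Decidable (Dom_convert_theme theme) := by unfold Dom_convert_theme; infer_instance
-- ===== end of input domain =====

-- B inverts each hex color nibble-wise via a digit table instead of A's per-channel slice/parse/subtract/format; objective: simpler.


-- ===== PORT A =====
-- value.lstrip('#'): drop leading '#' characters (exact: lstrip with a single strip char)
def pvLstripHash (s : List Char) : List Char := s.dropWhile (· == '#')

-- '{:x}' digit characters
def pvHexDigits : List Char := ['0','1','2','3','4','5','6','7','8','9','a','b','c','d','e','f']

-- '{:02x}'.format(n): exact for 0 ≤ n ≤ 255, the only values reachable under Pre_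
def pvFmt02x (n : Int) : List Char := [pvHexDigits.getD (n.toNat / 16 % 16) '0', pvHexDigits.getD (n.toNat % 16) '0']

-- int(hex_color[i:i+2], 16); none (ValueError) is excluded by Pre_, the default is never read there
def pvParseAt (cs : List Char) (i : Int) : Int :=
  (PySem.Int.ofCharsBase? (PySem.List.slice cs (some i) (some (i + 2))) 16).getD 0

def invert_hex (hex_color : String) : String :=
  let cs := pvLstripHash hex_color.toList
  let r := pvParseAt cs 0
  let g := pvParseAt cs 2
  let b := pvParseAt cs 4
  String.ofList ('#' :: (pvFmt02x (255 - r) ++ pvFmt02x (255 - g) ++ pvFmt02x (255 - b)))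

def convert_theme (theme : List (String × String)) : List (String × String) :=
  (theme.foldl (fun new_theme kv =>
    let new_value := if PySem.Str.startswith kv.2 "#" then invert_hex kv.2 else kv.2
    PySem.Dict.insert new_theme kv.1 new_value) PySem.Dict.empty).items

-- ===== PORT B =====
-- int(c, 16) for a single character; none (ValueError) is excluded by Pre_
def pvNibble (c : Char) : Int := (PySem.Int.ofCharsBase? [c] 16).getD 0

-- HEX[15 - int(c, 16)]
def pvInvDigit (c : Char) : Char := pvHexDigits.getD (15 - pvNibble c).toNat '0'

def pvInvertNibblewise (value : String) : String :=
  let s := (value.toList).dropWhile (· == '#')          -- value.lstrip('#')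
  String.ofList ('#' :: (PySem.List.slice s none (some 6)).map pvInvDigit)   -- s[:6], one table lookup per digit

def convert_theme_alt (theme : List (String × String)) : List (String × String) :=
  (theme.foldl (fun out kv =>
    PySem.Dict.insert out kv.1
      (if PySem.Str.startswith kv.2 "#" then pvInvertNibblewise kv.2 else kv.2)) PySem.Dict.empty).items

-- ===== PRECONDITION & SPEC =====
def pvIsHex (c : Char) : Bool :=
  decide (c ∈ (['0','1','2','3','4','5','6','7','8','9','a','b','c','d','e','f','A','B','C','D','E','F'] : List Char))

-- Pre_ excludes malformed '#'-values: those with fewer than 6 characters after stripping '#' (A raises,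
-- or on exactly-5-hex-digit values parses the lone last digit as the blue byte — an accident of slicing
-- no one would specify) and those whose first 6 characters are not all hex digits (A raises, except for
-- whitespace/sign characters that int() tolerates inside a 2-char channel, where A's value is an accident
-- of int() parsing); B raises ValueError on the sign/whitespace cases and neither value is the specified one.
def Pre_convert_theme (theme : List (String × String)) : Prop :=
  ∀ kv ∈ theme, PySem.Str.startswith kv.2 "#" = true →
    6 ≤ (kv.2.toList.dropWhile (· == '#')).length ∧
    ((kv.2.toList.dropWhile (· == '#')).take 6).all pvIsHex = true

instance (theme : List (String × String)) : Decidable (Pre_convert_theme theme) := by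
  unfold Pre_convert_theme; infer_instance

def pvWitness_convert_theme : (List (String × String)) := [("background", "#1aB2f0"), ("name", "dark")]

def Spec_convert_theme (theme : List (String × String)) (out : List (String × String)) : Prop := out = convert_theme_alt theme
instance (theme : List (String × String)) (out : List (String × String)) : Decidable (Spec_convert_theme theme out) := by unfold Spec_convert_theme; infer_instance

-- ===== CLAIM (what is proved, stated in full; the proofs are below) =====
def Claim_equal_convert_theme : Prop := ∀ (theme : List (String × String)), Dom_convert_theme theme → Pre_convert_theme theme → Spec_convert_theme theme (convert_theme theme)

-- ===== LEMMAS AND PROOFS =====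

-- the nibble value of a hex digit is in [0, 16)
theorem pvNibble_bounds (c : Char) (h : pvIsHex c = true) : 0 ≤ pvNibble c ∧ pvNibble c < 16 := by
  have h' : c ∈ (['0','1','2','3','4','5','6','7','8','9','a','b','c','d','e','f','A','B','C','D','E','F'] : List Char) := by
    simpa [pvIsHex] using h
  fin_cases h' <;> decide

-- int(ab, 16) on two hex digits is 16·nibble(a) + nibble(b)
theorem pvParse_pair (a b : Char) (ha : pvIsHex a = true) (hb : pvIsHex b = true) :
    PySem.Int.ofCharsBase? [a, b] 16 = some (16 * pvNibble a + pvNibble b) := by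
  have ha' : a ∈ (['0','1','2','3','4','5','6','7','8','9','a','b','c','d','e','f','A','B','C','D','E','F'] : List Char) := by
    simpa [pvIsHex] using ha
  have hb' : b ∈ (['0','1','2','3','4','5','6','7','8','9','a','b','c','d','e','f','A','B','C','D','E','F'] : List Char) := by
    simpa [pvIsHex] using hb
  fin_cases ha' <;> fin_cases hb' <;> decide

-- '{:02x}'.format(255 - (16x + y)) is the two complemented nibble digits
theorem pvFmt02x_compl (x y : Int) (hx0 : 0 ≤ x) (hx : x < 16) (hy0 : 0 ≤ y) (hy : y < 16) :
    pvFmt02x (255 - (16 * x + y)) = [pvHexDigits.getD (15 - x).toNat '0', pvHexDigits.getD (15 - y).toNat '0'] := by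
  have hval : (255 - (16 * x + y)) = (16 * (15 - x) + (15 - y)) := by ring
  have htn : (255 - (16 * x + y)).toNat = 16 * (15 - x).toNat + (15 - y).toNat := by omega
  have h1 : (255 - (16 * x + y)).toNat / 16 % 16 = (15 - x).toNat := by omega
  have h2 : (255 - (16 * x + y)).toNat % 16 = (15 - y).toNat := by omega
  simp [pvFmt02x, h1, h2]

-- the per-value functions agree on every well-formed '#'-color
theorem pvInvert_eq (v : String)
    (hlen : 6 ≤ (v.toList.dropWhile (· == '#')).length)
    (hhex : ((v.toList.dropWhile (· == '#')).take 6).all pvIsHex = true) :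
    invert_hex v = pvInvertNibblewise v := by
  set cs := v.toList.dropWhile (· == '#') with hcs
  obtain ⟨c0, c1, c2, c3, c4, c5, rest, hdec⟩ :
      ∃ c0 c1 c2 c3 c4 c5 rest, cs = c0 :: c1 :: c2 :: c3 :: c4 :: c5 :: rest := by
    match cs, hlen with
    | c0 :: c1 :: c2 :: c3 :: c4 :: c5 :: rest, _ => exact ⟨c0, c1, c2, c3, c4, c5, rest, rfl⟩
  rw [hdec] at hhex
  simp [List.all_cons] at hhex
  obtain ⟨h0, h1, h2, h3, h4, h5⟩ := hhex
  have p01 := pvParse_pair c0 c1 h0 h1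
  have p23 := pvParse_pair c2 c3 h2 h3
  have p45 := pvParse_pair c4 c5 h4 h5
  have b0 := pvNibble_bounds c0 h0; have b1 := pvNibble_bounds c1 h1
  have b2 := pvNibble_bounds c2 h2; have b3 := pvNibble_bounds c3 h3
  have b4 := pvNibble_bounds c4 h4; have b5 := pvNibble_bounds c5 h5
  have hs0 : PySem.List.slice cs (some 0) (some (0 + 2)) = [c0, c1] := by
    rw [hdec]; rw [show ((0 : Int) + 2) = ((2 : Nat) : Int) by norm_num,
      show (0 : Int) = ((0 : Nat) : Int) by norm_num, PySem.List.slice_natCast]; rfl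
  have hs2 : PySem.List.slice cs (some 2) (some (2 + 2)) = [c2, c3] := by
    rw [hdec]; rw [show ((2 : Int) + 2) = ((4 : Nat) : Int) by norm_num,
      show (2 : Int) = ((2 : Nat) : Int) by norm_num, PySem.List.slice_natCast]; rfl
  have hs4 : PySem.List.slice cs (some 4) (some (4 + 2)) = [c4, c5] := by
    rw [hdec]; rw [show ((4 : Int) + 2) = ((6 : Nat) : Int) by norm_num,
      show (4 : Int) = ((4 : Nat) : Int) by norm_num, PySem.List.slice_natCast]; rfl
  have hs6 : PySem.List.slice cs none (some 6) = [c0, c1, c2, c3, c4, c5] := by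
    rw [hdec]; rw [show (6 : Int) = ((6 : Nat) : Int) by norm_num, PySem.List.slice_to_natCast]; rfl
  have hlh : pvLstripHash v.toList = cs := by simp [pvLstripHash, hcs]
  simp only [invert_hex, pvInvertNibblewise, pvParseAt, hlh, ← hcs]
  rw [hs0, hs2, hs4, hs6, p01, p23, p45]
  simp only [Option.getD_some, List.map_cons, List.map_nil]
  rw [pvFmt02x_compl _ _ b0.1 b0.2 b1.1 b1.2,
      pvFmt02x_compl _ _ b2.1 b2.2 b3.1 b3.2,
      pvFmt02x_compl _ _ b4.1 b4.2 b5.1 b5.2]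
  simp [pvInvDigit]

-- ===== VERDICT (by name: the statement is the Claim_ definition above) =====
theorem convert_theme_spec : Claim_equal_convert_theme := by
  intro theme _ hpre
  show convert_theme theme = convert_theme_alt theme
  unfold convert_theme convert_theme_alt
  congr 1
  apply PySem.List.foldl_congr_mem
  intro acc kv hmem
  show PySem.Dict.insert acc kv.1 (if PySem.Str.startswith kv.2 "#" = true then invert_hex kv.2 else kv.2) =
       PySem.Dict.insert acc kv.1 (if PySem.Str.startswith kv.2 "#" = true then pvInvertNibblewise kv.2 else kv.2)
  by_cases hsw : PySem.Str.startswith kv.2 "#" = true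
  · rw [if_pos hsw, if_pos hsw, pvInvert_eq kv.2 (hpre kv hmem hsw).1 (hpre kv hmem hsw).2]
  · rw [if_neg hsw, if_neg hsw]
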